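-- pv_equiv track=rewrite | github.com/architaagarwal/GDPRizer | graph.py | union1
-- ===== SOURCE A (Python) =====
-- def union1(dx_parent, dx_child):
-- 	# c counts the number of overlaps between the two dxs
-- 	# unique contains the unique keys in dx_child
-- 	c = 0
-- 	unique = {}
-- 	for k, v in dx_child.items():
-- 		if k in dx_parent:
-- 			c += 1
-- 		else:
-- 			unique[k] = v
-- 		dx_parent[k] = v
-- 	return (c, unique)
-- ===== SOURCE B (Python) =====
-- def union1(dx_parent, dx_child):
--     # Divide and conquer: recursively split the child items, solve each half
--     # against the ORIGINAL parent, combine counts and unique dicts, then merge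
--     # dx_parent in one bulk update at the end (same mutation as A's per-key stores).
--     def go(items):
--         if not items:
--             return (0, {})
--         if len(items) == 1:
--             k, v = items[0]
--             return (1, {}) if k in dx_parent else (0, {k: v})
--         mid = len(items) // 2
--         c1, u1 = go(items[:mid])
--         c2, u2 = go(items[mid:])
--         u1.update(u2)
--         return (c1 + c2, u1)
--     res = go(list(dx_child.items()))
--     dx_parent.update(dx_child)
--     return res
-- ===== Notes on version B (the rewrite author's own statement) =====
-- stated objective: alternative
-- what changed: Replaces A's single accumulating pass (count, unique dict and parent mutation updated per element) with a divide-and-conquer recursion that splits the child items in half, solves each half against the original parent, combines counts and concatenates the unique dicts, and merges dx_parent in one bulk update at the end.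
import Mathlib
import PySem

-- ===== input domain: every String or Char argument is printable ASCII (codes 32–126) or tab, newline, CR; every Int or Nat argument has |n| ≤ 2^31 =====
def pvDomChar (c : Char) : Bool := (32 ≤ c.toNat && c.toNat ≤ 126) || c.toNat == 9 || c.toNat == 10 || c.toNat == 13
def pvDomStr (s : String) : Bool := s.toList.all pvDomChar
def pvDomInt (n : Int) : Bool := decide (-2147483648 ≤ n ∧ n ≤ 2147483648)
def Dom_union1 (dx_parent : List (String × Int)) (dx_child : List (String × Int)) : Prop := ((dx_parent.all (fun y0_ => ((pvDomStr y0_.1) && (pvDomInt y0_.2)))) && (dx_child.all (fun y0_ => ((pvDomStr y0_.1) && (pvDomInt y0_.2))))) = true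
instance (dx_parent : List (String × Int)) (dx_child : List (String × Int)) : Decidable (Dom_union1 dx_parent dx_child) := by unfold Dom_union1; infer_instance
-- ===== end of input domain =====

-- B replaces A's single branching pass by a divide-and-conquer recursion over the child items
-- (split in half, solve each half against the ORIGINAL parent, combine), with one bulk
-- dx_parent.update at the end (alternative decomposition, same cost). Both Pythons mutate
-- dx_parent identically; the equivalence proved here is about the RETURN value.

-- ===== PORT A =====
-- state: (c, unique, dx_parent); for k, v in dx_child.items(): branch on 'k in dx_parent', then dx_parent[k] = v
def union1 (dx_parent : List (String × Int)) (dx_child : List (String × Int)) : Int × (List (String × Int)) :=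
  let r := dx_child.foldl
    (fun (s : Int × PySem.Dict String Int × PySem.Dict String Int) (p : String × Int) =>
      if s.2.2.contains p.1 then (s.1 + 1, s.2.1, s.2.2.insert p.1 p.2)
      else (s.1, s.2.1.insert p.1 p.2, s.2.2.insert p.1 p.2))
    (0, PySem.Dict.empty, PySem.Dict.mk dx_parent)
  (r.1, r.2.1.items)

-- ===== PORT B =====
-- go(items): empty / singleton base cases, else split at mid = len//2, recurse on items[:mid]
-- and items[mid:] (nonnegative slices = take/drop), combine with c1+c2 and u1.update(u2).
def union1AltGo (parent : PySem.Dict String Int) (items : List (String × Int)) : Int × PySem.Dict String Int :=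
  if h0 : items.isEmpty then (0, PySem.Dict.empty)
  else if h1 : items.length = 1 then
    match items with
    | [] => (0, PySem.Dict.empty)   -- unreachable (items nonempty)
    | p :: _ => if parent.contains p.1 then (1, PySem.Dict.empty) else (0, PySem.Dict.mk [p])
  else
    let mid := items.length / 2
    let r1 := union1AltGo parent (items.take mid)
    let r2 := union1AltGo parent (items.drop mid)
    (r1.1 + r2.1, r1.2.update r2.2.items)
termination_by items.length
decreasing_by
  all_goals
    have hlen : items.length ≠ 0 := by
      intro h
      exact h0 (by simp [List.isEmpty_iff, List.length_eq_zero_iff.mp h])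
    simp only [List.length_take, List.length_drop]
    omega

def union1_alt (dx_parent : List (String × Int)) (dx_child : List (String × Int)) : Int × (List (String × Int)) :=
  let r := union1AltGo (PySem.Dict.mk dx_parent) dx_child
  (r.1, r.2.items)

-- ===== PRECONDITION & SPEC =====
-- Pre_ excludes dx_child association lists with duplicate keys: such a list does not represent
-- any Python dict (dict construction collapses duplicates), so A's list-level behaviour there is accidental.
def Pre_union1 (dx_parent : List (String × Int)) (dx_child : List (String × Int)) : Prop :=
  (dx_child.map (·.1)).Nodup
instance (dx_parent : List (String × Int)) (dx_child : List (String × Int)) : Decidable (Pre_union1 dx_parent dx_child) := by unfold Pre_union1; infer_instance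
def pvWitness_union1 : (List (String × Int)) × (List (String × Int)) := ([("a", 1)], [("a", 2), ("b", 3)])

def Spec_union1 (dx_parent : List (String × Int)) (dx_child : List (String × Int)) (out : Int × (List (String × Int))) : Prop := out = union1_alt dx_parent dx_child
instance (dx_parent : List (String × Int)) (dx_child : List (String × Int)) (out : Int × (List (String × Int))) : Decidable (Spec_union1 dx_parent dx_child out) := by unfold Spec_union1; infer_instance

-- ===== CLAIM (what is proved, stated in full; the proofs are below) =====
def Claim_equal_union1 : Prop := ∀ (dx_parent : List (String × Int)) (dx_child : List (String × Int)), Dom_union1 dx_parent dx_child → Pre_union1 dx_parent dx_child → Spec_union1 dx_parent dx_child (union1 dx_parent dx_child)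

-- ===== LEMMAS AND PROOFS =====

-- A's loop: as long as the pending child keys are fresh w.r.t. the accumulated parent's changes,
-- c counts the child entries whose key is in the ORIGINAL parent, and unique collects the others.
lemma union1_loop (P : PySem.Dict String Int) (l : List (String × Int))
    (hnd : (l.map (·.1)).Nodup) :
    ∀ (c : Int) (u pa : PySem.Dict String Int),
      (∀ p ∈ l, pa.contains p.1 = P.contains p.1) →
      (l.foldl
        (fun (s : Int × PySem.Dict String Int × PySem.Dict String Int) (p : String × Int) =>
          if s.2.2.contains p.1 then (s.1 + 1, s.2.1, s.2.2.insert p.1 p.2)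
          else (s.1, s.2.1.insert p.1 p.2, s.2.2.insert p.1 p.2)) (c, u, pa)).1
        = c + ((l.filter (fun p => P.contains p.1)).length : Int)
      ∧ (l.foldl
        (fun (s : Int × PySem.Dict String Int × PySem.Dict String Int) (p : String × Int) =>
          if s.2.2.contains p.1 then (s.1 + 1, s.2.1, s.2.2.insert p.1 p.2)
          else (s.1, s.2.1.insert p.1 p.2, s.2.2.insert p.1 p.2)) (c, u, pa)).2.1
        = l.foldl (fun d p => if P.contains p.1 then d else d.insert p.1 p.2) u := by
  induction l with
  | nil => intro c u pa _; simp
  | cons p t ih =>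
    intro c u pa hpa
    rw [List.map_cons, List.nodup_cons] at hnd
    have hfresh : p.1 ∉ t.map (·.1) := hnd.1
    have hndt : (t.map (·.1)).Nodup := hnd.2
    have hpaP : pa.contains p.1 = P.contains p.1 := hpa p (List.mem_cons_self ..)
    have hstep : ∀ q ∈ t, (pa.insert p.1 p.2).contains q.1 = P.contains q.1 := by
      intro q hq
      have hne : q.1 ≠ p.1 := by
        intro h; exact hfresh (h ▸ List.mem_map_of_mem hq)
      rw [PySem.Dict.contains_insert]
      simp [hne, hpa q (List.mem_cons_of_mem _ hq)]
    by_cases h : P.contains p.1 = true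
    · have := ih hndt (c + 1) u (pa.insert p.1 p.2) hstep
      simp only [List.foldl_cons, List.filter_cons, hpaP, h, if_true]
      refine ⟨?_, this.2⟩
      rw [this.1]; push_cast [List.length_cons]; ring
    · have hf : P.contains p.1 = false := by simpa using h
      have := ih hndt c (u.insert p.1 p.2) (pa.insert p.1 p.2) hstep
      simp only [List.foldl_cons, List.filter_cons, hpaP, hf]
      simpa [hf] using this

-- B's recursion computes the same closed form: the overlap count and the dict of the
-- non-overlapping child entries, in order.
lemma union1AltGo_spec (P : PySem.Dict String Int) (items : List (String × Int))
    (hnd : (items.map (·.1)).Nodup) :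
    union1AltGo P items
      = (((items.filter (fun p => P.contains p.1)).length : Int),
         PySem.Dict.mk (items.filter (fun p => !P.contains p.1))) := by
  by_cases h0 : items.isEmpty
  · have he : items = [] := List.isEmpty_iff.mp h0
    subst he
    simp [union1AltGo, PySem.Dict.empty]
  · by_cases h1 : items.length = 1
    · obtain ⟨p, hp⟩ := List.length_eq_one_iff.mp h1
      subst hp
      rw [union1AltGo]
      cases h : P.contains p.1 <;> simp [h, PySem.Dict.empty]
    · rw [union1AltGo, dif_neg h0, dif_neg h1]
      have hlen : items.length ≠ 0 := by
        intro h
        exact h0 (by simp [List.length_eq_zero_iff.mp h])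
      have hT := List.take_append_drop (items.length / 2) items
      have hnd' := hnd
      rw [← hT, List.map_append, List.nodup_append] at hnd'
      obtain ⟨hnd1, hnd2, hdisj⟩ := hnd'
      have ih1 := union1AltGo_spec P (items.take (items.length / 2)) hnd1
      have ih2 := union1AltGo_spec P (items.drop (items.length / 2)) hnd2
      have hrhs1 : items.filter (fun p => P.contains p.1)
          = (items.take (items.length / 2)).filter (fun p => P.contains p.1)
            ++ (items.drop (items.length / 2)).filter (fun p => P.contains p.1) := by
        conv_lhs => rw [← hT]
        rw [List.filter_append]
      have hrhs2 : items.filter (fun p => !P.contains p.1)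
          = (items.take (items.length / 2)).filter (fun p => !P.contains p.1)
            ++ (items.drop (items.length / 2)).filter (fun p => !P.contains p.1) := by
        conv_lhs => rw [← hT]
        rw [List.filter_append]
      set f1 := (items.take (items.length / 2)).filter (fun p => !P.contains p.1) with hf1
      set f2 := (items.drop (items.length / 2)).filter (fun p => !P.contains p.1) with hf2
      have hnd2' : (f2.map (·.1)).Nodup := by
        have hsub := List.filter_sublist (p := fun p => !P.contains p.1)
          (l := items.drop (items.length / 2))
        exact (hsub.map _).nodup hnd2
      have hfresh : ∀ a ∈ f2, (PySem.Dict.mk f1).contains a.1 = false := by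
        intro a ha
        rw [PySem.Dict.contains_eq_decide_mem_keys, PySem.Dict.keys_mk]
        have ha2 : a.1 ∈ (items.drop (items.length / 2)).map (·.1) := by
          have := List.mem_filter.mp (hf2 ▸ ha)
          exact List.mem_map_of_mem this.1
        have hnot : a.1 ∉ f1.map (·.1) := by
          intro hm
          have hsub := List.filter_sublist (p := fun p => !P.contains p.1)
            (l := items.take (items.length / 2))
          have : a.1 ∈ (items.take (items.length / 2)).map (·.1) :=
            (hsub.map (·.1)).mem hm
          exact hdisj _ this _ ha2 rfl
        simpa [PySem.Dict.keys_mk] using hnot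
      have hitems := PySem.Dict.items_foldl_insert_fresh f2 (·.1) (·.2)
        (PySem.Dict.mk f1) hfresh hnd2'
      dsimp only
      rw [ih1, ih2]
      refine Prod.ext ?_ ?_
      · simp only [hrhs1, List.length_append]
        push_cast
        ring
      · show (PySem.Dict.mk f1).update f2 = _
        apply PySem.Dict.ext
        simp only [PySem.Dict.update, hitems, hrhs2]
        simp
termination_by items.length
decreasing_by
  all_goals
    simp only [List.length_take, List.length_drop]
    omega

-- ===== VERDICT (by name: the statement is the Claim_ definition above) =====
theorem union1_spec : Claim_equal_union1 := by
  intro dx_parent dx_child _ hpre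
  unfold Spec_union1 union1 union1_alt
  dsimp only
  set P : PySem.Dict String Int := PySem.Dict.mk dx_parent with hP
  have hloop := union1_loop P dx_child hpre 0 PySem.Dict.empty P (fun _ _ => rfl)
  rw [union1AltGo_spec P dx_child hpre]
  refine Prod.ext ?_ ?_
  · rw [hloop.1]; simp
  · simp only [hloop.2]
    have hfun : (fun (d : PySem.Dict String Int) (p : String × Int) =>
          if P.contains p.1 then d else d.insert p.1 p.2)
        = (fun d p => if (!P.contains p.1) = true then d.insert p.1 p.2 else d) := by
      funext d p; cases h : P.contains p.1 <;> simp [h]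
    rw [hfun, ← List.foldl_filter]
    have hndf : ((dx_child.filter (fun p => !P.contains p.1)).map (·.1)).Nodup := by
      have hsub := List.filter_sublist (p := fun p => !P.contains p.1) (l := dx_child)
      exact (hsub.map _).nodup hpre
    have hitems := PySem.Dict.items_foldl_insert_fresh
      (dx_child.filter (fun p => !P.contains p.1)) (·.1) (·.2) PySem.Dict.empty
      (fun a _ => by simp) hndf
    simp only [hitems]
    simp [PySem.Dict.empty]
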